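-- pv_equiv track=rewrite | github.com/philipmories/LoRTIA-Plus | benchmark/LRGASP/boundary_benchmark/scripts/lortia_gff3_to_gtf.py | gtf_attr_str
-- ===== SOURCE A (Python) =====
-- def gtf_attr_str(d: dict) -> str:
--     # Stable-ish order helps diffs
--     keys = ["gene_id", "transcript_id", "exon_number", "tag"]
--     out = []
--     used = set()
--     for k in keys:
--         if k in d:
--             out.append(f'{k} "{d[k]}";')
--             used.add(k)
--     for k in sorted(d.keys()):
--         if k in used:
--             continue
--         out.append(f'{k} "{d[k]}";')
--     return " ".join(out)
-- ===== SOURCE B (Python) =====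
-- def gtf_attr_str(d: dict) -> str:
--     # One comparator-driven ordering pass: priority keys first (by fixed rank,
--     # never comparing an int against a string), remaining keys alphabetically.
--     rank = {"gene_id": 0, "transcript_id": 1, "exon_number": 2, "tag": 3}
--     ordered = sorted(d, key=lambda k: (rank.get(k, 4), "" if k in rank else k))
--     return " ".join(f'{k} "{d[k]}";' for k in ordered)
-- ===== Notes on version B (the rewrite author's own statement) =====
-- stated objective: idiomatic
-- what changed: A's two-pass construction (a loop over the priority keys building a `used` set, then a loop over sorted(d) skipping used keys) is replaced by a single sorted() call whose composite key (rank.get(k,4), '' if k in rank else k) yields the whole ordering in one comparator-driven pass, followed by one join.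
import Mathlib
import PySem

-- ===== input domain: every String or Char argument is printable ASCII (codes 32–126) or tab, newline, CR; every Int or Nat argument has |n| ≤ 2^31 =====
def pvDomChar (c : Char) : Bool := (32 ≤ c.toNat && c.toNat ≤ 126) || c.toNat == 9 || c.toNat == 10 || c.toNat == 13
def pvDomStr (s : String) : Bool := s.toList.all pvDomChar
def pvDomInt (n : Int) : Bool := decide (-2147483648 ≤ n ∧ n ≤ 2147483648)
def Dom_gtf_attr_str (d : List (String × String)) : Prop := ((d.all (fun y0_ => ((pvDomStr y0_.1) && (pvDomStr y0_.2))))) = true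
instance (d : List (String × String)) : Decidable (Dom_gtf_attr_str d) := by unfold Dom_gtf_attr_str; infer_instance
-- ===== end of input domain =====

-- B replaces A's two-pass split (priority loop with a `used` set, then sorted remainder)
-- by ONE comparator-driven sorted pass over all keys; objective: idiomatic, same cost.

-- ===== PORT A =====
def gtf_attr_str (d : List (String × String)) : String :=
  let dd := PySem.Dict.ofList d
  let keys : List String := ["gene_id", "transcript_id", "exon_number", "tag"]
  -- first loop: out/used built together
  let st := keys.foldl
    (fun (acc : List String × PySem.Set String) k =>
      if dd.contains k then
        (acc.1 ++ [k ++ " \"" ++ ((dd.get? k).getD "") ++ "\";"], PySem.Set.add acc.2 k)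
      else acc)
    ([], PySem.Set.empty)
  -- second loop over sorted(d.keys())
  let out := (PySem.List.sorted dd.keys (fun x => x)).foldl
    (fun acc k =>
      if PySem.Set.contains st.2 k then acc
      else acc ++ [k ++ " \"" ++ ((dd.get? k).getD "") ++ "\";"])
    st.1
  PySem.Str.join " " out

-- ===== PORT B =====
-- B-side helper: the literal rank dict of Source B
def pvRank : PySem.Dict String Int :=
  PySem.Dict.ofList [("gene_id", 0), ("transcript_id", 1), ("exon_number", 2), ("tag", 3)]

def gtf_attr_str_alt (d : List (String × String)) : String :=
  let dd := PySem.Dict.ofList d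
  let ordered := PySem.List.sorted2 dd.keys
    (fun k => pvRank.getD k 4)
    (fun k => if pvRank.contains k then "" else k)
  PySem.Str.join " " (ordered.map (fun k => k ++ " \"" ++ ((dd.get? k).getD "") ++ "\";"))

-- ===== PRECONDITION & SPEC =====
def Spec_gtf_attr_str (d : List (String × String)) (out : String) : Prop := out = gtf_attr_str_alt d
instance (d : List (String × String)) (out : String) : Decidable (Spec_gtf_attr_str d out) := by unfold Spec_gtf_attr_str; infer_instance

-- ===== CLAIM (what is proved, stated in full; the proofs are below) =====
def Claim_equal_gtf_attr_str : Prop := ∀ (d : List (String × String)), Dom_gtf_attr_str d → Spec_gtf_attr_str d (gtf_attr_str d)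

-- ===== LEMMAS AND PROOFS =====

-- the priority list and both ports' key functions, named for the proofs
def priL : List String := ["gene_id", "transcript_id", "exon_number", "tag"]
def k1f (k : String) : Int := pvRank.getD k 4
def k2f (k : String) : String := if pvRank.contains k then "" else k
def lexKey (k : String) : Lex (Int × String) := toLex (k1f k, k2f k)
def fmtd (d : List (String × String)) (k : String) : String :=
  k ++ " \"" ++ (((PySem.Dict.ofList d).get? k).getD "") ++ "\";"

-- sorted2 with integer key k1 and string key k2 is sorted with the lexicographic key
lemma sorted2_eq_sorted_lex {a : Type} (xs : List a) (k1 : a -> Int) (k2 : a -> String) :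
    PySem.List.sorted2 xs k1 k2 = PySem.List.sorted xs (fun x => toLex (k1 x, k2 x)) := by
  have hf : (fun (p q : a) => decide (k1 p < k1 q) || (!decide (k1 q < k1 p) && decide (k2 p < k2 q)))
      = (fun p q => decide (toLex (k1 p, k2 p) < toLex (k1 q, k2 q))) := by
    funext p q
    rcases lt_trichotomy (k1 p) (k1 q) with h|h|h
    . simp [Prod.Lex.lt_iff, h]
    . simp [Prod.Lex.lt_iff, h]
    . simp [Prod.Lex.lt_iff, h, h.ne', lt_asymm h]
  show xs.foldl (fun acc x => PySem.List.insertBy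
      (fun p q => decide (k1 p < k1 q) || (!decide (k1 q < k1 p) && decide (k2 p < k2 q))) x acc) []
    = xs.foldl (fun acc x => PySem.List.insertBy
      (fun p q => decide (toLex (k1 p, k2 p) < toLex (k1 q, k2 q))) x acc) []
  rw [hf]

lemma rank_contains (k : String) : pvRank.contains k = decide (k ∈ priL) := by
  by_cases h : k ∈ priL
  . rw [decide_eq_true h]
    have h4 : k = "gene_id" ∨ k = "transcript_id" ∨ k = "exon_number" ∨ k = "tag" := by
      simpa [priL] using h
    rcases h4 with rfl|rfl|rfl|rfl <;> rfl
  . rw [decide_eq_false h]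
    simp only [priL, List.mem_cons, List.not_mem_nil, or_false, not_or] at h
    obtain ⟨h1, h2, h3, h4⟩ := h
    show (PySem.Dict.mk [("gene_id", (0:Int)), ("transcript_id", 1), ("exon_number", 2), ("tag", 3)]).contains k = false
    rw [PySem.Dict.contains_mk]
    simp [List.any_cons, List.any_nil, Ne.symm h1, Ne.symm h2, Ne.symm h3, Ne.symm h4]

lemma rank_getD_of_not_mem {k : String} (h : k ∉ priL) : pvRank.getD k 4 = 4 := by
  simp only [priL, List.mem_cons, List.not_mem_nil, or_false, not_or] at h
  obtain ⟨h1, h2, h3, h4⟩ := h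
  show (PySem.Dict.mk [("gene_id", (0:Int)), ("transcript_id", 1), ("exon_number", 2), ("tag", 3)]).getD k 4 = 4
  simp [PySem.Dict.getD, PySem.Dict.get?, beq_iff_eq,
    Ne.symm h1, Ne.symm h2, Ne.symm h3, Ne.symm h4]

lemma rank_getD_lt_of_mem {k : String} (h : k ∈ priL) : pvRank.getD k 4 < 4 := by
  have h4 : k = "gene_id" ∨ k = "transcript_id" ∨ k = "exon_number" ∨ k = "tag" := by
    simpa [priL] using h
  rcases h4 with rfl|rfl|rfl|rfl <;> decide

lemma k2f_of_not_mem {k : String} (h : k ∉ priL) : k2f k = k := by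
  unfold k2f
  rw [rank_contains, decide_eq_false h]
  rfl


def ordA (K : List String) : List String :=
  priL.filter (fun k => decide (k ∈ K))
    ++ (PySem.List.sorted K (fun x => x)).filter (fun k => !decide (k ∈ priL))

-- A's first loop in closed form
lemma foldl_pair (l : List String) (p : String -> Bool) (f : String -> String)
    (a1 : List String) (a2 : PySem.Set String) :
    l.foldl (fun (acc : List String × PySem.Set String) k =>
        if p k then (acc.1 ++ [f k], PySem.Set.add acc.2 k) else acc) (a1, a2)
      = (a1 ++ (l.filter p).map f, (l.filter p).foldl PySem.Set.add a2) := by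
  induction l generalizing a1 a2 with
  | nil => simp
  | cons x t ih =>
      by_cases h : p x = true
      . simp [List.foldl_cons, h, ih]
      . simp only [Bool.not_eq_true] at h
        simp [List.foldl_cons, h, ih]

-- A's second loop in closed form
lemma foldl_skip (p : String -> Bool) (f : String -> String) (l : List String) (acc : List String) :
    l.foldl (fun acc k => if p k then acc else acc ++ [f k]) acc
      = acc ++ (l.filter (fun k => !p k)).map f := by
  have h : (fun (acc : List String) k => if p k then acc else acc ++ [f k])
      = (fun acc k => if (!p k) then acc ++ [f k] else acc) := by
    funext a k
    cases hp : p k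
    . simp
    . simp
  rw [h, PySem.List.foldl_append_if]

lemma keys_nodup (d : List (String × String)) : (PySem.Dict.ofList d).keys.Nodup :=
  PySem.Dict.nodup_keys_ofList d

lemma ordA_perm {K : List String} (hK : K.Nodup) : (ordA K).Perm K := by
  unfold ordA
  have h1 : (priL.filter (fun k => decide (k ∈ K))).Perm (K.filter (fun k => decide (k ∈ priL))) := by
    rw [List.perm_ext_iff_of_nodup (List.Nodup.filter _ (by decide)) (List.Nodup.filter _ hK)]
    intro a
    simp [List.mem_filter, and_comm]
  have h2 : ((PySem.List.sorted K (fun x => x)).filter (fun k => !decide (k ∈ priL))).Perm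
      (K.filter (fun k => !decide (k ∈ priL))) :=
    (PySem.List.sorted_perm K (fun x => x) false).filter _
  exact (h1.append h2).trans (List.filter_append_perm _ K)

lemma ordA_pairwise {K : List String} (hK : K.Nodup) :
    (ordA K).Pairwise (fun p q => lexKey p < lexKey q) := by
  unfold ordA
  rw [List.pairwise_append]
  refine ⟨?_, ?_, ?_⟩
  . have hpri : priL.Pairwise (fun p q => lexKey p < lexKey q) := by decide
    exact List.Pairwise.sublist List.filter_sublist hpri
  . have h1 := PySem.List.sorted_pairwise K (fun x => x)
    have h2 : (PySem.List.sorted K (fun x => x)).Nodup :=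
      ((PySem.List.sorted_perm K (fun x => x) false).nodup_iff).mpr hK
    have hS : (PySem.List.sorted K (fun x => x)).Pairwise (fun p q : String => p < q) :=
      (List.pairwise_and_iff.mpr ⟨h1, h2⟩).imp (fun hpq => lt_of_le_of_ne hpq.1 hpq.2)
    refine List.Pairwise.imp_of_mem ?_ (List.Pairwise.sublist List.filter_sublist hS)
    intro p q hp hq hpq
    have hp' : p ∉ priL := by simpa using (List.mem_filter.mp hp).2
    have hq' : q ∉ priL := by simpa using (List.mem_filter.mp hq).2
    simp only [lexKey, Prod.Lex.lt_iff, ofLex_toLex]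
    right
    refine ⟨by rw [k1f, k1f, rank_getD_of_not_mem hp', rank_getD_of_not_mem hq'], ?_⟩
    rw [k2f_of_not_mem hp', k2f_of_not_mem hq']
    exact hpq
  . intro p hp q hq
    have hp' : p ∈ priL := (List.mem_filter.mp hp).1
    have hq' : q ∉ priL := by simpa using (List.mem_filter.mp hq).2
    simp only [lexKey, Prod.Lex.lt_iff, ofLex_toLex]
    left
    rw [k1f, k1f, rank_getD_of_not_mem hq']
    exact rank_getD_lt_of_mem hp'

lemma sorted_lex_eq_ordA {K : List String} (hK : K.Nodup) :
    PySem.List.sorted K lexKey = ordA K :=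
  PySem.List.sorted_eq_of_perm_of_pairwise_lt K (ordA K) lexKey (ordA_perm hK) (ordA_pairwise hK)

lemma outA_eq (d : List (String × String)) :
    gtf_attr_str d = PySem.Str.join " " ((ordA (PySem.Dict.ofList d).keys).map (fmtd d)) := by
  unfold gtf_attr_str
  dsimp only
  rw [show (["gene_id", "transcript_id", "exon_number", "tag"] : List String) = priL from rfl]
  rw [foldl_pair]
  dsimp only
  rw [foldl_skip]
  have hfil : (PySem.List.sorted (PySem.Dict.ofList d).keys (fun x => x)).filter
      (fun k => !PySem.Set.contains
        ((priL.filter (fun k => (PySem.Dict.ofList d).contains k)).foldl PySem.Set.add PySem.Set.empty) k)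
      = (PySem.List.sorted (PySem.Dict.ofList d).keys (fun x => x)).filter
        (fun k => !decide (k ∈ priL)) := by
    apply List.filter_congr
    intro k hk
    have hkK : k ∈ (PySem.Dict.ofList d).keys :=
      (PySem.List.sorted_perm (PySem.Dict.ofList d).keys (fun x => x) false).mem_iff.mp hk
    have hc : (PySem.Dict.ofList d).contains k = true :=
      (PySem.Dict.contains_iff_mem_keys _ k).mpr hkK
    have hfold : (priL.filter (fun k => (PySem.Dict.ofList d).contains k)).foldl PySem.Set.add
        PySem.Set.empty
        = PySem.Set.ofList (priL.filter (fun k => (PySem.Dict.ofList d).contains k)) := by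
      rw [PySem.Set.ofList_eq_foldl]
      rfl
    rw [hfold]
    congr 1
    by_cases hm : k ∈ priL
    . have hmem : k ∈ PySem.Set.ofList (priL.filter (fun k => (PySem.Dict.ofList d).contains k)) :=
        (PySem.Set.mem_ofList _ _).mpr (List.mem_filter.mpr ⟨hm, hc⟩)
      simp [PySem.Set.contains, hmem, hm]
    . have hmem : k ∉ PySem.Set.ofList (priL.filter (fun k => (PySem.Dict.ofList d).contains k)) := by
        rw [PySem.Set.mem_ofList]
        intro hx
        exact hm (List.mem_filter.mp hx).1
      simp [PySem.Set.contains, hmem, hm]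
  rw [hfil]
  have hP1 : priL.filter (fun k => (PySem.Dict.ofList d).contains k)
      = priL.filter (fun k => decide (k ∈ (PySem.Dict.ofList d).keys)) :=
    List.filter_congr (fun k _ => PySem.Dict.contains_eq_decide_mem_keys _ k)
  rw [hP1, List.nil_append, ← List.map_append]
  rfl

lemma outB_eq (d : List (String × String)) :
    gtf_attr_str_alt d = PySem.Str.join " " ((ordA (PySem.Dict.ofList d).keys).map (fmtd d)) := by
  unfold gtf_attr_str_alt
  dsimp only
  rw [sorted2_eq_sorted_lex]
  rw [show (fun x => toLex (pvRank.getD x 4, if pvRank.contains x then "" else x)) = lexKey from rfl]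
  rw [sorted_lex_eq_ordA (keys_nodup d)]
  rfl

-- ===== VERDICT (by name: the statement is the Claim_ definition above) =====
theorem gtf_attr_str_spec : Claim_equal_gtf_attr_str := by
  intro d _
  unfold Spec_gtf_attr_str
  rw [outA_eq, outB_eq]
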